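-- pv_equiv track=rewrite | github.com/AkzhanBerdi/grid_mvp | services/smart_analytics.py | _count_completed_cycles
-- ===== SOURCE A (Python) =====
-- from typing import Dict, List
--
-- def _count_completed_cycles(trades: List) -> int:
--     """Count completed buy-sell cycles"""
--     completed = 0
--
--     # Group by symbol
--     symbol_trades = {}
--     for trade in trades:
--         symbol = trade[0]
--         if symbol not in symbol_trades:
--             symbol_trades[symbol] = []
--         symbol_trades[symbol].append(trade)
--
--     # For each symbol, count sell orders (each sell completes a cycle)
--     for symbol, symbol_trade_list in symbol_trades.items():
--         sells = [t for t in symbol_trade_list if t[1] == "SELL"]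
--         completed += len(sells)
--
--     return completed
-- ===== SOURCE B (Python) =====
-- def _count_completed_cycles(trades) -> int:
--     """Count completed buy-sell cycles: one per SELL order, in a single pass."""
--     return sum(1 for t in trades if t[1] == "SELL")
-- ===== Notes on version B (the rewrite author's own statement) =====
-- stated objective: simpler
-- what changed: Drops the symbol-grouping dictionary and the per-symbol filtering pass entirely; B counts SELL trades directly in one scan, since each sell completes a cycle regardless of grouping.
import Mathlib
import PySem

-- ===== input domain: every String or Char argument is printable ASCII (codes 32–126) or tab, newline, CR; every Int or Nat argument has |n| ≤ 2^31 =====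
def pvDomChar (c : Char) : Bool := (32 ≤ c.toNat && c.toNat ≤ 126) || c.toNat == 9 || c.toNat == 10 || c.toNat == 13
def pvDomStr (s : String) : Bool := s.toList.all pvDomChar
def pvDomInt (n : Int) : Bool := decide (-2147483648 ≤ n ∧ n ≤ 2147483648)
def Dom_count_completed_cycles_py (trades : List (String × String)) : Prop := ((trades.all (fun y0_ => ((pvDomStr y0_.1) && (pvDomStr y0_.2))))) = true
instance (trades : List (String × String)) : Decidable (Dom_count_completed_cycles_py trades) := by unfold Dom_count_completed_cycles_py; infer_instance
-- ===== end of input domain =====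

-- B drops A's symbol-grouping dictionary and counts SELL trades in one direct pass (objective: simpler).

-- ===== PORT A =====
-- one iteration of A's grouping loop: `if symbol not in d: d[symbol] = []` then `d[symbol].append(trade)`
def cccStep (d : PySem.Dict String (List (String × String))) (t : String × String) :
    PySem.Dict String (List (String × String)) :=
  let d1 := if d.contains t.1 then d else d.insert t.1 []
  d1.insert t.1 (d1.getD t.1 [] ++ [t])

def count_completed_cycles_py (trades : List (String × String)) : Int :=
  let symbol_trades := trades.foldl cccStep PySem.Dict.empty
  -- `for symbol, lst in symbol_trades.items(): completed += len([t for t in lst if t[1] == "SELL"])`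
  symbol_trades.items.foldl
    (fun completed kv => completed + ((kv.2.filter (fun t => t.2 == "SELL")).length : Int)) 0

-- ===== PORT B =====
-- `return sum(1 for t in trades if t[1] == "SELL")`
def count_completed_cycles_py_alt (trades : List (String × String)) : Int :=
  (trades.countP (fun t => t.2 == "SELL") : Int)

-- ===== PRECONDITION & SPEC =====
def Spec_count_completed_cycles_py (trades : List (String × String)) (out : Int) : Prop := out = count_completed_cycles_py_alt trades
instance (trades : List (String × String)) (out : Int) : Decidable (Spec_count_completed_cycles_py trades out) := by unfold Spec_count_completed_cycles_py; infer_instance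

-- ===== CLAIM (what is proved, stated in full; the proofs are below) =====
def Claim_equal_count_completed_cycles_py : Prop := ∀ (trades : List (String × String)), Dom_count_completed_cycles_py trades → Spec_count_completed_cycles_py trades (count_completed_cycles_py trades)

-- ===== LEMMAS AND PROOFS =====

-- A's two-branch loop body is exactly `d[t.1] = d.get(t.1, []) + [t]`
theorem cccStep_eq_modify (d : PySem.Dict String (List (String × String))) (t : String × String) :
    cccStep d t = d.modify t.1 [] (· ++ [t]) := by
  unfold cccStep
  by_cases h : d.contains t.1 = true
  · simp [h, PySem.Dict.modify, PySem.Dict.getD_eq_get?_getD]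
  · simp only [Bool.not_eq_true] at h
    simp [h, PySem.Dict.insert_insert_self,
      PySem.Dict.modify, PySem.Dict.getD_eq_get?_getD,
      (PySem.Dict.get?_eq_none_iff_contains d t.1).mpr h]

-- the grouped-partition sum: over a duplicate-free key list covering every trade's symbol,
-- the per-symbol SELL counts add up to the global SELL count
theorem sum_partition (K : List String) (trades : List (String × String))
    (hnd : K.Nodup) (hcov : ∀ t ∈ trades, t.1 ∈ K) :
    (K.map (fun k =>
        (((trades.filter (fun t => t.1 == k)).filter (fun t => t.2 == "SELL")).length : Int))).sum
      = (trades.countP (fun t => t.2 == "SELL") : Int) := by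
  induction trades with
  | nil => simp
  | cons t rest ih =>
    have hrest : ∀ u ∈ rest, u.1 ∈ K := fun u hu => hcov u (List.mem_cons_of_mem _ hu)
    by_cases hq : t.2 = "SELL"
    · have : (K.map (fun k =>
          ((((t :: rest).filter (fun u => u.1 == k)).filter (fun u => u.2 == "SELL")).length : Int))).sum
          = (K.map (fun k =>
              ((((rest.filter (fun u => u.1 == k)).filter (fun u => u.2 == "SELL")).length : Int)
               + (if t.1 == k then 1 else 0)))).sum := by
        congr 1
        apply List.map_congr_left
        intro k _
        by_cases hk : t.1 = k <;> simp [hk, hq]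
      rw [this, PySem.List.sum_map_add_int, ih hrest, PySem.List.sum_map_ite_one_zero]
      have hone : K.countP (fun k => t.1 == k) = 1 := by
        have hm : t.1 ∈ K := hcov t List.mem_cons_self
        have h1 : K.count t.1 = 1 := List.count_eq_one_of_mem hnd hm
        rw [List.count] at h1
        rw [← h1]
        exact List.countP_congr (fun k _ => by simp only [beq_iff_eq]; exact eq_comm)
      simp [hq, hone]
    · have : (K.map (fun k =>
          ((((t :: rest).filter (fun u => u.1 == k)).filter (fun u => u.2 == "SELL")).length : Int))).sum
          = (K.map (fun k =>
              (((rest.filter (fun u => u.1 == k)).filter (fun u => u.2 == "SELL")).length : Int))).sum := by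
        congr 1
        apply List.map_congr_left
        intro k _
        by_cases hk : t.1 = k <;> simp [hk, hq]
      rw [this, ih hrest]
      simp [hq]

-- ===== VERDICT (by name: the statement is the Claim_ definition above) =====
theorem count_completed_cycles_py_spec : Claim_equal_count_completed_cycles_py := by
  intro trades _
  unfold Spec_count_completed_cycles_py count_completed_cycles_py count_completed_cycles_py_alt
  have hfold : trades.foldl cccStep PySem.Dict.empty
      = (trades.map (fun t => (t.1, t))).foldl
          (fun d p => d.modify p.1 [] (· ++ [p.2])) PySem.Dict.empty := by
    rw [List.foldl_map]
    exact PySem.List.foldl_congr_mem _ _ _ _ (fun d t _ => cccStep_eq_modify d t)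
  rw [hfold]
  set l := trades.map (fun t => (t.1, t)) with hl
  set d := l.foldl (fun d p => d.modify p.1 [] (· ++ [p.2])) PySem.Dict.empty with hd
  have hnd : d.keys.Nodup := by
    rw [hd]
    exact PySem.Dict.nodup_keys_foldl_modify_key l (·.1) [] (fun _ p => (· ++ [p.2])) _
      PySem.Dict.nodup_keys_empty
  have hgetD : ∀ k, d.getD k [] = trades.filter (fun t => t.1 == k) := by
    intro k
    rw [hd, PySem.Dict.getD_foldl_modify_append, PySem.Dict.getD_empty, hl]
    simp [List.filter_map, List.map_map, Function.comp_def]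
  have hitems : d.items = d.keys.map (fun k => (k, d.getD k [])) :=
    PySem.Dict.items_eq_map_keys d hnd []
  have hkeys : ∀ t ∈ trades, t.1 ∈ d.keys := by
    intro t ht
    rw [hd, PySem.Dict.keys_foldl_modify_key]
    have : t.1 ∈ l.map (·.1) := by
      rw [hl]; simp only [List.map_map, Function.comp_def]
      exact List.mem_map_of_mem ht
    simpa [PySem.Dict.keys_empty, PySem.Set.update_nil_left, PySem.Set.mem_ofList] using this
  rw [PySem.List.foldl_add, hitems, List.map_map]
  simp only [Function.comp_def]
  calc (0 : Int) + (d.keys.map (fun k =>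
          (((d.getD k []).filter (fun t => t.2 == "SELL")).length : Int))).sum
      = (d.keys.map (fun k =>
          (((trades.filter (fun t => t.1 == k)).filter (fun t => t.2 == "SELL")).length : Int))).sum := by
        simp only [zero_add]
        congr 1
        exact List.map_congr_left (fun k _ => by rw [hgetD k])
    _ = (trades.countP (fun t => t.2 == "SELL") : Int) := sum_partition d.keys trades hnd hkeys
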